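-- pv_equiv track=rewrite | github.com/swq19930922/practice | practice/Algorithm/DrawRepeat.py | draw_repeat
-- ===== SOURCE A (Python) =====
-- def draw_repeat(strs):
--     '''字符串去重，修改多少次可以使相邻字符不重复'''
--     lenth = len(strs)
--     count = 0
--     swap = False            # 默认未修改
--     i = 1
--     while i < lenth:
--         if strs[i] == strs[i-1] and not swap:   # 若与前一个元素相等且未修改，则计数加1，swap = True
--             count += 1
--             swap = True
--         else:
--             swap = False
--             if strs[i] == strs[i-1] and swap:     # 若与前一个元素相同但已修改，则跳过该元素
--                 i += 1
--         i += 1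
--     return count
-- ===== SOURCE B (Python) =====
-- def draw_repeat(strs):
--     '''字符串去重，修改多少次可以使相邻字符不重复'''
--     total = 0
--     i = 0
--     n = len(strs)
--     while i < n:
--         j = i + 1
--         while j < n and strs[j] == strs[i]:
--             j += 1
--         total += (j - i) // 2
--         i = j
--     return total
-- ===== Notes on version B (the rewrite author's own statement) =====
-- stated objective: simpler
-- what changed: Replaced the stateful flag-toggling pointer scan (with a dead inner branch) by a run-decomposition: scan each maximal run of equal characters and add floor(run_length/2).
import Mathlib
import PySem

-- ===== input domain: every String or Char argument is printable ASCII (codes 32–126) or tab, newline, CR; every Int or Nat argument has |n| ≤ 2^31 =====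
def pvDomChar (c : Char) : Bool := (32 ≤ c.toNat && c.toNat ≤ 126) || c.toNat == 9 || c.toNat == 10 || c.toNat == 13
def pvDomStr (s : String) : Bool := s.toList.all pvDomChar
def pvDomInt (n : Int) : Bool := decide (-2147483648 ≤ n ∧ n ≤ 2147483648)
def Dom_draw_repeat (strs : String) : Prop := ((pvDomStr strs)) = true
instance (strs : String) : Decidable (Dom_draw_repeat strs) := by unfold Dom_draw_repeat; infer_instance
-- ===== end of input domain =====

-- B replaces A's flag-toggling pointer scan by a run-decomposition (floor(run/2) per maximal run); objective: simpler.

-- ===== PORT A =====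
-- Literal port of A's while loop: state (i, count, swap); fuel bounds the iterations
-- (i strictly increases each pass, so cs.length fuel suffices).
def drawRepeatLoop (cs : List Char) (lenth : Int) (i : Int) (count : Int) (swap : Bool) : Nat → Int
  | 0 => count
  | fuel + 1 =>
    if i < lenth then
      if (PySem.List.pyGet? cs i == PySem.List.pyGet? cs (i - 1)) && !swap then
        drawRepeatLoop cs lenth (i + 1) (count + 1) true fuel
      else
        -- swap = False; dead inner branch transliterated:
        let i' := if (PySem.List.pyGet? cs i == PySem.List.pyGet? cs (i - 1)) && false then i + 1 else i
        drawRepeatLoop cs lenth (i' + 1) count false fuel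
    else count

def draw_repeat (strs : String) : Int :=
  drawRepeatLoop strs.toList (strs.toList.length : Int) 1 0 false strs.toList.length

-- ===== PORT B =====
-- Port of Source B's run scan: the inner while is the takeWhile/dropWhile split of the run
-- beginning at position i, the outer while is the recursion over the remaining suffix.
def drawRepeatRuns : List Char → Int
  | [] => 0
  | c :: rest =>
    (((rest.takeWhile (fun x => x == c)).length + 1) / 2 : Nat)
      + drawRepeatRuns (rest.dropWhile (fun x => x == c))
termination_by cs => cs.length
decreasing_by
  exact Nat.lt_succ_of_le (List.length_dropWhile_le _ _)

def draw_repeat_alt (strs : String) : Int := drawRepeatRuns strs.toList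

-- ===== PRECONDITION & SPEC =====
def Spec_draw_repeat (strs : String) (out : Int) : Prop := out = draw_repeat_alt strs
instance (strs : String) (out : Int) : Decidable (Spec_draw_repeat strs out) := by unfold Spec_draw_repeat; infer_instance

-- ===== CLAIM (what is proved, stated in full; the proofs are below) =====
def Claim_equal_draw_repeat : Prop := ∀ (strs : String), Dom_draw_repeat strs → Spec_draw_repeat strs (draw_repeat strs)

-- ===== LEMMAS AND PROOFS =====

-- Structural reformulation of A's loop: scan the tail keeping the previous char and the flag.
def scanA (prev : Char) (cs : List Char) (swap : Bool) (count : Int) : Int :=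
  match cs with
  | [] => count
  | c :: cs =>
    if c == prev && !swap then scanA c cs true (count + 1) else scanA c cs false count

theorem drawRepeatLoop_eq_scanA (rest : List Char) :
    ∀ (pre : List Char) (prev : Char) (swap : Bool) (count : Int) (fuel : Nat),
      rest.length ≤ fuel →
      drawRepeatLoop (pre ++ prev :: rest) ((pre.length + 1 + rest.length : Nat) : Int)
        ((pre.length : Int) + 1) count swap fuel = scanA prev rest swap count := by
  induction rest with
  | nil =>
    intro pre prev swap count fuel _
    cases fuel with
    | zero => rfl
    | succ f =>
      simp [drawRepeatLoop, scanA]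
  | cons c rs ih =>
    intro pre prev swap count fuel hf
    cases fuel with
    | zero => simp at hf
    | succ f =>
      have hget1 : PySem.List.pyGet? (pre ++ prev :: c :: rs) ((pre.length : Int) + 1) = some c := by
        have : ((pre.length : Int) + 1) = ((pre ++ [prev]).length : Int) := by simp
        rw [this, List.append_cons pre prev (c :: rs), PySem.List.pyGet?_natCast]
        simp
      have hget0 : PySem.List.pyGet? (pre ++ prev :: c :: rs) ((pre.length : Int) + 1 - 1) = some prev := by
        have : ((pre.length : Int) + 1 - 1) = ((pre.length : Nat) : Int) := by ring
        rw [this, PySem.List.pyGet?_natCast]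
        simp
      have hlt : ((pre.length : Int) + 1) < ((pre.length + 1 + (c :: rs).length : Nat) : Int) := by
        simp only [List.length_cons]; push_cast; omega
      rw [drawRepeatLoop, if_pos hlt, hget1, hget0]
      have hlen : (c :: rs).length = rs.length + 1 := rfl
      by_cases hc : (c == prev) && !swap
      · rw [if_pos (by simpa using hc)]
        have := ih (pre ++ [prev]) c true (count + 1) f (by simpa using Nat.le_of_succ_le_succ (by simpa [hlen] using hf))
        simp only [List.length_append, List.length_cons] at this ⊢
        rw [scanA, if_pos hc]
        rw [show pre ++ prev :: c :: rs = (pre ++ [prev]) ++ c :: rs by simp] at *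
        convert this using 2 <;> push_cast [List.length_nil] <;> ring
      · rw [if_neg (by simpa using hc)]
        simp only [Bool.and_false]
        have := ih (pre ++ [prev]) c false count f (by simpa [hlen] using Nat.le_of_succ_le_succ (by simpa [hlen] using hf))
        simp only [List.length_append, List.length_cons] at this ⊢
        rw [scanA, if_neg hc]
        rw [show pre ++ prev :: c :: rs = (pre ++ [prev]) ++ c :: rs by simp] at *
        convert this using 2 <;> push_cast [List.length_nil] <;> ring

theorem scanA_shift (cs : List Char) : ∀ (prev : Char) (swap : Bool) (count : Int),
    scanA prev cs swap count = count + scanA prev cs swap 0 := by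
  induction cs with
  | nil => intro prev swap count; simp [scanA]
  | cons c cs ih =>
    intro prev swap count
    rw [scanA, scanA]
    split_ifs
    · rw [ih c true (count + 1), ih c true (0 + 1)]; try ring
    · rw [ih c false count, ih c false 0]; try ring

-- A run of characters equal to prev contributes floor(k/2) (starting unswapped).
theorem scanA_run (c : Char) (tail : List Char) (htail : tail = [] ∨ ∃ t ts, tail = t :: ts ∧ t ≠ c) :
    ∀ (run : List Char) (b : Bool) (count : Int), (∀ x ∈ run, x = c) →
      scanA c (run ++ tail) b count
        = count + (((if b then run.length / 2 else (run.length + 1) / 2) : Nat) : Int)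
            + scanA c tail false 0 := by
  intro run
  induction run with
  | nil =>
    intro b count _
    simp only [List.nil_append, List.length_nil]
    have hbase : scanA c tail b count = count + scanA c tail false 0 := by
      rcases htail with h | ⟨t, ts, h, hne⟩
      · subst h; simp [scanA]
      · subst h
        rw [scanA, scanA]
        rw [if_neg (by simp [hne]), if_neg (by simp [hne])]
        exact scanA_shift ts t false count
    rw [hbase]; cases b <;> simp
  | cons r rs ih =>
    intro b count hmem
    have hr : r = c := hmem r (by simp)
    subst hr
    rw [List.cons_append, scanA]
    cases b with
    | false =>
      rw [if_pos (by simp)]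
      rw [ih true (count + 1) (fun x hx => hmem x (by simp [hx]))]
      simp only [List.length_cons]
      have : ((rs.length + 1 + 1) / 2 : Nat) = (rs.length / 2 : Nat) + 1 := by omega
      rw [this]; push_cast; ring
    | true =>
      rw [if_neg (by simp)]
      rw [ih false count (fun x hx => hmem x (by simp [hx]))]
      simp

theorem scanA_eq_runs : ∀ (n : Nat) (cs : List Char), cs.length ≤ n → ∀ (c : Char),
    scanA c cs false 0 = drawRepeatRuns (c :: cs) := by
  intro n
  induction n with
  | zero =>
    intro cs hcs c
    have : cs = [] := List.length_eq_zero_iff.mp (Nat.le_zero.mp hcs)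
    subst this
    simp [scanA, drawRepeatRuns]
  | succ n ih =>
    intro cs hcs c
    rw [drawRepeatRuns]
    have hsplit : cs = cs.takeWhile (fun x => x == c) ++ cs.dropWhile (fun x => x == c) :=
      (List.takeWhile_append_dropWhile).symm
    have hdroph : cs.dropWhile (fun x => x == c) = [] ∨
        ∃ u us, cs.dropWhile (fun x => x == c) = u :: us ∧ u ≠ c := by
      cases hd : cs.dropWhile (fun x => x == c) with
      | nil => exact Or.inl rfl
      | cons u us =>
        refine Or.inr ⟨u, us, rfl, ?_⟩
        have := List.head_dropWhile_not (fun x => x == c) (l := cs) (by simp [hd])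
        simpa [hd] using this
    have hmem : ∀ x ∈ cs.takeWhile (fun x => x == c), x = c := by
      intro x hx
      simpa using List.mem_takeWhile_imp hx
    conv_lhs => rw [hsplit]
    rw [scanA_run c _ hdroph _ false 0 hmem]
    have htailval : scanA c (cs.dropWhile (fun x => x == c)) false 0
        = drawRepeatRuns (cs.dropWhile (fun x => x == c)) := by
      rcases hdroph with hd | ⟨u, us, hd, hne⟩
      · rw [hd]; simp [scanA, drawRepeatRuns]
      · rw [hd, scanA, if_neg (by simp [hne]), ih us ?_ u, ← hd]
        have h1 : (u :: us).length ≤ cs.length := by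
          rw [← hd]; exact List.length_dropWhile_le _ _
        simp only [List.length_cons] at h1
        omega
    rw [htailval]
    simp

-- ===== VERDICT (by name: the statement is the Claim_ definition above) =====
theorem draw_repeat_spec : Claim_equal_draw_repeat := by
  intro strs _
  unfold Spec_draw_repeat draw_repeat draw_repeat_alt
  cases h : strs.toList with
  | nil => simp [drawRepeatLoop, drawRepeatRuns]
  | cons c rest =>
    have hb := drawRepeatLoop_eq_scanA rest [] c false 0 (c :: rest).length (by simp)
    simp only [List.nil_append, List.length_nil, Nat.cast_zero, zero_add] at hb
    rw [show ((c :: rest).length : Int) = ((1 + rest.length : Nat) : Int) by simp [Nat.add_comm], hb]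
    exact scanA_eq_runs rest.length rest le_rfl c
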